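-- pv_equiv track=rewrite | github.com/fc29280/FP2526 | stable_matching.py | generate_all_matchings
-- ===== SOURCE A (Python) =====
-- def permutations(list, perms=[]):
--     """
--     Takes as input a list `list`, and an optional list of permutations `perms`, and calculates the permutations of `list`, adding `perms` to the top.
--     """
--     # complete me
--
--     # if list is empty , return list of perms
--     if len(list) == 0:
--         return [perms]
--
--     # initialise empty list of all permutations
--     all_perms = []
--
--     # for each element in the list
--     for i in range(len(list)):
--         # obtain the remaining elements of the list
--         current = list[i]
--
--         # recursively call permutations , with the remaining elements , and the new permutations formed by adding the chosen element of the list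
--         # lista[:i] = elementos antes de i
--         # lista[i+1:] = elementos depois de i
--         remaining = list[:i] + list[i+1:]
--
--         # Cria novas permutações adicionando o elemento atual às perms existentes
--         new_perms = perms + [current]
--
--         # Recursão para obter permutações dos elementos restantes
--         sub_perms = permutations(remaining, new_perms)
--
--         # add all new permutation in a list of permutations
--         all_perms = all_perms + sub_perms #evitar alterar a lista enquanto se itera sobre ela (all_perms += sub_perms)
--
--     return all_perms
--
-- def generate_all_matchings(proposers, acceptors):
--     """
--     Takes as input a list of proposers `proposers` and a list of acceptors `acceptors` and returns a list of all possible one-to-one matchings between proposers and acceptors.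
--     """
--     # complete me
--
--     # Obtém todas as permutações dos acceptors
--     # Reutiliza a função permutations criada anteriormente
--     acceptor_perms = permutations(acceptors)
--
--     # Inicializa lista para guardar todos os matchings
--     all_matchings = []
--
--     # Para cada permutação de acceptors
--     for perm in acceptor_perms:
--         # Cria um matching emparelhando cada proposer com o acceptor correspondente
--         matching = []
--         for i in range(len(proposers)):
--             # Cria par (proposer, acceptor)
--             pair = (proposers[i], perm[i])
--             matching.append(pair)
--
--         # Adiciona o matching à lista
--         all_matchings.append(matching)
--
--     return all_matchings
-- ===== SOURCE B (Python) =====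
-- def generate_all_matchings(proposers, acceptors):
--     perms = []
--     stack = [([], acceptors)]
--     while stack:
--         prefix, remaining = stack.pop()
--         if not remaining:
--             perms.append(prefix)
--         else:
--             for i in reversed(range(len(remaining))):
--                 stack.append((prefix + [remaining[i]],
--                               remaining[:i] + remaining[i + 1:]))
--     return [list(zip(proposers, perm)) for perm in perms]
-- ===== Notes on version B (the rewrite author's own statement) =====
-- stated objective: alternative
-- what changed: Replaces the recursive accumulator-passing permutations helper and the index-loop pairing with an explicit-stack (worklist) DFS over (prefix, remaining) frames plus zip for the pairing, emitting the same permutations in the same order.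
import Mathlib
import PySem

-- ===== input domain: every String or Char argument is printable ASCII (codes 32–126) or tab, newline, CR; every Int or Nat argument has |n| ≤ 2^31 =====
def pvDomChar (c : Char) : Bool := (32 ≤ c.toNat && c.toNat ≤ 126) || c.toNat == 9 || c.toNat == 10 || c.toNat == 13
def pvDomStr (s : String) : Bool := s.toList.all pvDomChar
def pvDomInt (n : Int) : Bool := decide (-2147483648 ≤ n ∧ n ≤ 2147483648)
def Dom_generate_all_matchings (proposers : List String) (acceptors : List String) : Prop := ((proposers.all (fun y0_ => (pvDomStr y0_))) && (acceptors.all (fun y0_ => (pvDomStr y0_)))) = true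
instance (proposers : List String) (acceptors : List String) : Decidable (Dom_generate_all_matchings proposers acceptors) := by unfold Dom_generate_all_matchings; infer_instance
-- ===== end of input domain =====

-- B replaces the recursive permutations helper by an explicit-stack DFS and the index-loop
-- pairing by zip (alternative decomposition, same cost); proved equal where A returns
-- (Pre_: len(proposers) ≤ len(acceptors); outside, A raises IndexError and B truncates).

-- ===== PORT A =====

-- permutations(list, perms): list[:i]+list[i+1:] is take i ++ drop (i+1) and list[i] is l[i]
-- (exact: i ranges over 0..len-1, all indices in range)
def pvPermsA (l : List String) (perms : List String) : List (List String) :=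
  if l.length = 0 then [perms]
  else
    (List.range l.length).attach.foldl
      (fun all_perms i =>
        all_perms ++ pvPermsA (l.take i.1 ++ l.drop (i.1 + 1)) (perms ++ [l.getD i.1 ""]))
      []
termination_by l.length
decreasing_by
  have hi : i.1 < l.length := List.mem_range.mp i.2
  simp [List.length_take, List.length_drop]
  omega

def generate_all_matchings (proposers : List String) (acceptors : List String) :
    List (List (String × String)) :=
  let acceptor_perms := pvPermsA acceptors []
  -- proposers[i] / perm[i]: indices are in range inside Pre_, so getD's default is never read
  acceptor_perms.foldl
    (fun all_matchings perm =>
      all_matchings ++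
        [(List.range proposers.length).foldl
          (fun matching i => matching ++ [(proposers.getD i "", perm.getD i "")]) []])
    []

-- ===== PORT B =====
def pvStackMeasure (stack : List (List String × List String)) : Nat :=
  (stack.map (fun f => (f.2.length + 1).factorial)).sum

theorem pvRevFoldl_cons {α β : Type} (l : List α) (f : α → β) (rest : List β) :
    l.reverse.foldl (fun st i => f i :: st) rest = l.map f ++ rest := by
  rw [List.foldl_reverse]; induction l <;> simp_all

theorem pvPush_measure (pre rem : List String) (rest : List (List String × List String))
    (h : rem ≠ []) :
    pvStackMeasure ((List.range rem.length).reverse.foldl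
      (fun st i => (pre ++ [rem.getD i ""], rem.take i ++ rem.drop (i + 1)) :: st) rest)
      < pvStackMeasure ((pre, rem) :: rest) := by
  rw [pvRevFoldl_cons]
  simp only [pvStackMeasure, List.map_append, List.sum_append, List.map_cons, List.sum_cons,
    List.map_map]
  have hn : 0 < rem.length := List.length_pos_iff.mpr h
  have : ((List.range rem.length).map
      ((fun f => (f.2.length + 1).factorial) ∘
        fun i => (pre ++ [rem.getD i ""], rem.take i ++ rem.drop (i + 1)))).sum
      = rem.length * rem.length.factorial := by
    rw [List.map_congr_left (g := fun _ => rem.length.factorial), List.map_const']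
    · simp [List.sum_replicate]
    · intro i hi
      have : i < rem.length := List.mem_range.mp hi
      simp [List.length_take, List.length_drop]
      congr 1
      omega
  rw [this]
  have h2 : rem.length * rem.length.factorial < (rem.length + 1).factorial := by
    rw [Nat.factorial_succ]
    exact (Nat.mul_lt_mul_right (Nat.factorial_pos _)).mpr (by omega)
  omega

def pvPermsB : List (List String × List String) → List (List String) → List (List String)
  | [], out => out
  | (pre, remaining) :: rest, out =>
    if h : remaining.isEmpty then pvPermsB rest (out ++ [pre])
    else pvPermsB
      ((List.range remaining.length).reverse.foldl
        (fun st i => (pre ++ [remaining.getD i ""],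
                      remaining.take i ++ remaining.drop (i + 1)) :: st) rest)
      out
termination_by stack _ => pvStackMeasure stack
decreasing_by
  · simp only [pvStackMeasure, List.map_cons, List.sum_cons]
    have := Nat.factorial_pos (remaining.length + 1)
    omega
  · exact pvPush_measure pre remaining rest (by simpa using h)

def generate_all_matchings_alt (proposers : List String) (acceptors : List String) :
    List (List (String × String)) :=
  (pvPermsB [([], acceptors)] []).map (fun perm => proposers.zip perm)

-- ===== PRECONDITION & SPEC =====
-- Pre_ excludes len(proposers) > len(acceptors), on which A raises IndexError (perm[i] out of range).
def Pre_generate_all_matchings (proposers : List String) (acceptors : List String) : Prop :=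
  proposers.length ≤ acceptors.length
instance (proposers : List String) (acceptors : List String) :
    Decidable (Pre_generate_all_matchings proposers acceptors) := by
  unfold Pre_generate_all_matchings; infer_instance
def pvWitness_generate_all_matchings : List String × List String := (["a"], ["x", "y"])

def Spec_generate_all_matchings (proposers : List String) (acceptors : List String)
    (out : List (List (String × String))) : Prop :=
  out = generate_all_matchings_alt proposers acceptors
instance (proposers : List String) (acceptors : List String)
    (out : List (List (String × String))) :
    Decidable (Spec_generate_all_matchings proposers acceptors out) := by
  unfold Spec_generate_all_matchings; infer_instance

-- ===== CLAIM (what is proved, stated in full; the proofs are below) =====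
def Claim_equal_generate_all_matchings : Prop := ∀ (proposers : List String) (acceptors : List String), Dom_generate_all_matchings proposers acceptors → Pre_generate_all_matchings proposers acceptors → Spec_generate_all_matchings proposers acceptors (generate_all_matchings proposers acceptors)

-- ===== LEMMAS AND PROOFS =====

theorem pvPermsA_nil (ps : List String) : pvPermsA [] ps = [ps] := by
  rw [pvPermsA.eq_def]; simp

-- A's recursion, unrolled one level on a nonempty list.
theorem pvPermsA_cons (l ps : List String) (h : l ≠ []) :
    pvPermsA l ps = (List.range l.length).flatMap
      (fun i => pvPermsA (l.take i ++ l.drop (i + 1)) (ps ++ [l.getD i ""])) := by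
  rw [pvPermsA]
  rw [if_neg (by simpa using h)]
  rw [PySem.List.foldl_append_eq_flatMap]
  conv_rhs => rw [← List.attach_map_subtype_val (List.range l.length)]
  rw [List.flatMap_map]
  simp

-- every permutation produced has length |ps| + |l|
theorem pvPermsA_length_aux : ∀ (n : Nat) (l ps p : List String), l.length = n →
    p ∈ pvPermsA l ps → p.length = ps.length + l.length := by
  intro n
  induction n using Nat.strong_induction_on with
  | _ n ih =>
    intro l ps p hn hp
    by_cases hl : l = []
    · subst hl
      rw [pvPermsA_nil] at hp
      simp at hp
      simp [hp]
    · rw [pvPermsA_cons l ps hl] at hp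
      rcases List.mem_flatMap.mp hp with ⟨i, hi, hmem⟩
      have hilt : i < l.length := List.mem_range.mp hi
      have hlen : (l.take i ++ l.drop (i + 1)).length = l.length - 1 := by
        simp [List.length_take, List.length_drop]; omega
      have := ih (l.length - 1) (by omega) _ _ p hlen hmem
      simp [hlen] at this
      omega

theorem pvPermsA_length (l ps p : List String) (h : p ∈ pvPermsA l ps) :
    p.length = ps.length + l.length :=
  pvPermsA_length_aux l.length l ps p rfl h

-- DFS invariant: the stack machine emits, in order, A's permutations of each frame.
theorem pvPermsB_eq (stack : List (List String × List String)) (out : List (List String)) :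
    pvPermsB stack out = out ++ stack.flatMap (fun f => pvPermsA f.2 f.1) := by
  induction stack, out using pvPermsB.induct with
  | case1 out => simp [pvPermsB]
  | case2 pre remaining rest out h ih =>
    rw [pvPermsB, dif_pos h, ih]
    have hrem : remaining = [] := List.isEmpty_iff.mp h
    subst hrem
    rw [List.flatMap_cons, pvPermsA_nil]
    simp
  | case3 pre remaining rest out h ih =>
    rw [pvPermsB, dif_neg h, ih, pvRevFoldl_cons, List.flatMap_append, List.flatMap_map]
    rw [List.flatMap_cons]
    rw [pvPermsA_cons remaining pre (by simpa using h)]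

-- A's index-loop pairing is zip when proposers is no longer than the permutation.
theorem pvPair_eq_zip (p q : List String) (h : p.length ≤ q.length) :
    (List.range p.length).map (fun i => (p.getD i "", q.getD i "")) = p.zip q := by
  induction p generalizing q with
  | nil => simp
  | cons x p' ih =>
    cases q with
    | nil => simp at h
    | cons y q' =>
      rw [List.length_cons, List.range_succ_eq_map, List.map_cons, List.map_map]
      simp only [Function.comp_def, List.getD_cons_zero, List.getD_cons_succ]
      rw [List.zip_cons_cons, ih q' (by simpa using h)]

-- ===== VERDICT (by name: the statement is the Claim_ definition above) =====
theorem generate_all_matchings_spec : Claim_equal_generate_all_matchings := by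
  intro proposers acceptors _ hpre
  unfold Spec_generate_all_matchings generate_all_matchings generate_all_matchings_alt
  rw [pvPermsB_eq]
  simp only [List.flatMap_cons, List.flatMap_nil, List.append_nil, List.nil_append]
  rw [PySem.List.foldl_append_singleton_eq_map]
  rw [List.nil_append]
  apply List.map_congr_left
  intro perm hperm
  rw [PySem.List.foldl_append_singleton_eq_map, List.nil_append]
  have hlen : perm.length = acceptors.length := by
    simpa using pvPermsA_length acceptors [] perm hperm
  have hp : proposers.length ≤ acceptors.length := hpre
  exact pvPair_eq_zip proposers perm (by omega)
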